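-- pv_equiv track=rewrite | github.com/frankaging/BabyARC | code/dataset/operator.py | _rotate_tag
-- ===== SOURCE A (Python) =====
-- import copy
--
-- def _rotate_tag(original_tags, n):
--     """
--     rotate the tag ccw
--     """
--     curr_position_tags = copy.deepcopy(original_tags)
--     for i in range(n):
--         new_position_tags = []
--         for t in curr_position_tags:
--             if t == "upper":
--                 new_position_tags.append("left")
--             elif t == "left":
--                 new_position_tags.append("lower")
--             elif t == "lower":
--                 new_position_tags.append("right")
--             elif t == "right":
--                 new_position_tags.append("upper")
--             else:
--                 pass
--         curr_position_tags = copy.deepcopy(new_position_tags) # recurrent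
--     return curr_position_tags
-- ===== SOURCE B (Python) =====
-- # Different algorithm: the four tags form a cycle of period 4, so instead of
-- # applying the rotation n times, apply the offset n % 4 to each tag directly
-- # (dropping unknown tags once, as any single rotation of A does when n >= 1).
-- def _rotate_tag(original_tags, n):
--     """
--     rotate the tag ccw
--     """
--     if n <= 0:
--         return list(original_tags)
--     cycle = ["upper", "left", "lower", "right"]
--     idx = {t: i for i, t in enumerate(cycle)}
--     k = n % 4
--     return [cycle[(idx[t] + k) % 4] for t in original_tags if t in idx]
-- ===== Notes on version B (the rewrite author's own statement) =====
-- stated objective: faster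
-- what changed: B replaces A's n-fold re-scan of the list with a single pass applying the period-4 cyclic offset n % 4 to each tag (filtering unknown tags once when n >= 1).
import Mathlib
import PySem

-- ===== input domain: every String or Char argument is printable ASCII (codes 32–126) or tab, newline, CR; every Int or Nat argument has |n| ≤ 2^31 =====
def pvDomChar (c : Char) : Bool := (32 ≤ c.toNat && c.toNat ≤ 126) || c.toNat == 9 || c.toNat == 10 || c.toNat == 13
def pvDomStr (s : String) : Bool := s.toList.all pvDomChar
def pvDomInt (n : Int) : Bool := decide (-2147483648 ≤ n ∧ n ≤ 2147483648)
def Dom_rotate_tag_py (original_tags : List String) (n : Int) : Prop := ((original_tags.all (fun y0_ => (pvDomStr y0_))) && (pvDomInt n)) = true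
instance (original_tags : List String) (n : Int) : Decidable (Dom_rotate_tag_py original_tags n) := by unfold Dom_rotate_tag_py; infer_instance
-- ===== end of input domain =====

-- B rotates each tag by the offset n % 4 in one pass (period-4 cycle) instead of A's n full passes.

-- ===== PORT A =====
-- inner loop of A: one CCW rotation, building new_position_tags by appending
def pvRotOnce (ts : List String) : List String :=
  ts.foldl (fun acc t =>
    if t = "upper" then acc ++ ["left"]
    else if t = "left" then acc ++ ["lower"]
    else if t = "lower" then acc ++ ["right"]
    else if t = "right" then acc ++ ["upper"]
    else acc) []

def rotate_tag_py (original_tags : List String) (n : Int) : List String :=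
  -- for i in range(n): curr = one rotation of curr
  (PySem.List.pyRange 0 n 1).foldl (fun curr _ => pvRotOnce curr) original_tags

-- ===== PORT B =====
def pvCycle : List String := ["upper", "left", "lower", "right"]

-- idx = {t: i for i, t in enumerate(cycle)}; 't in idx' / 'idx[t]' as one lookup
def pvIdx? (t : String) : Option Nat :=
  if t = "upper" then some 0
  else if t = "left" then some 1
  else if t = "lower" then some 2
  else if t = "right" then some 3
  else none

def rotate_tag_py_alt (original_tags : List String) (n : Int) : List String :=
  if n ≤ 0 then original_tags
  else
    let k := (PySem.Int.mod n 4).toNat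
    original_tags.filterMap (fun t => (pvIdx? t).map (fun i => pvCycle.getD ((i + k) % 4) ""))

-- ===== PRECONDITION & SPEC =====
def Spec_rotate_tag_py (original_tags : List String) (n : Int) (out : List String) : Prop := out = rotate_tag_py_alt original_tags n
instance (original_tags : List String) (n : Int) (out : List String) : Decidable (Spec_rotate_tag_py original_tags n out) := by unfold Spec_rotate_tag_py; infer_instance

-- ===== CLAIM (what is proved, stated in full; the proofs are below) =====
def Claim_equal_rotate_tag_py : Prop := ∀ (original_tags : List String) (n : Int), Dom_rotate_tag_py original_tags n → Spec_rotate_tag_py original_tags n (rotate_tag_py original_tags n)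

-- ===== LEMMAS AND PROOFS =====

-- single-step map: what one rotation does to one tag (none = dropped)
def pvStep1 (t : String) : Option String :=
  if t = "upper" then some "left"
  else if t = "left" then some "lower"
  else if t = "lower" then some "right"
  else if t = "right" then some "upper"
  else none

-- k-step map on a known tag
def pvF (k : Nat) (t : String) : Option String :=
  (pvIdx? t).map (fun i => pvCycle.getD ((i + k) % 4) "")

-- iterated rotation, front-first (matches A's loop)
def pvLoopA : Nat → List String → List String
  | 0, ts => ts
  | k+1, ts => pvLoopA k (pvRotOnce ts)

theorem pvRotOnce_foldl (ts : List String) (acc : List String) :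
    ts.foldl (fun acc t =>
      if t = "upper" then acc ++ ["left"]
      else if t = "left" then acc ++ ["lower"]
      else if t = "lower" then acc ++ ["right"]
      else if t = "right" then acc ++ ["upper"]
      else acc) acc = acc ++ ts.filterMap pvStep1 := by
  induction ts generalizing acc with
  | nil => simp
  | cons t ts ih =>
    simp only [List.foldl_cons, List.filterMap_cons, pvStep1]
    split_ifs <;> simp [ih, pvStep1]

theorem pvRotOnce_eq (ts : List String) : pvRotOnce ts = ts.filterMap pvStep1 := by
  simpa using pvRotOnce_foldl ts []

theorem pvCycle_getD_congr {a b : Nat} (h : a % 4 = b % 4) :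
    pvCycle.getD (a % 4) "" = pvCycle.getD (b % 4) "" := by rw [h]

theorem pvStep1_eq_F1 (t : String) : pvStep1 t = pvF 1 t := by
  unfold pvStep1 pvF pvIdx?
  split_ifs <;> rfl

theorem pvStep_bind_F (k : Nat) (t : String) :
    (pvStep1 t).bind (pvF k) = pvF (k + 1) t := by
  unfold pvStep1 pvF pvIdx?
  split_ifs <;> simp only [Option.bind_some, Option.bind_none, Option.map_some, Option.map_none] <;>
    first | rfl | exact congrArg some (pvCycle_getD_congr (by omega))

theorem pvLoopA_eq (k : Nat) (ts : List String) :
    pvLoopA (k + 1) ts = ts.filterMap (pvF (k + 1)) := by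
  induction k generalizing ts with
  | zero =>
    show pvLoopA 0 (pvRotOnce ts) = _
    simp only [pvLoopA, pvRotOnce_eq]
    exact List.filterMap_congr (fun t _ => pvStep1_eq_F1 t)
  | succ k ih =>
    show pvLoopA (k + 1) (pvRotOnce ts) = _
    rw [ih, pvRotOnce_eq, List.filterMap_filterMap]
    exact List.filterMap_congr (fun t _ => pvStep_bind_F (k + 1) t)

theorem pvFoldl_ignore (l : List Int) (ts : List String) :
    l.foldl (fun curr _ => pvRotOnce curr) ts = pvLoopA l.length ts := by
  induction l generalizing ts with
  | nil => rfl
  | cons x l ih => simpa [pvLoopA] using ih (pvRotOnce ts)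

theorem pvF_period (m k : Nat) (h : m % 4 = k % 4) (t : String) : pvF m t = pvF k t := by
  unfold pvF
  cases pvIdx? t with
  | none => rfl
  | some i => exact congrArg some (pvCycle_getD_congr (by omega))

-- ===== VERDICT (by name: the statement is the Claim_ definition above) =====
theorem rotate_tag_py_spec : Claim_equal_rotate_tag_py := by
  intro ts n _
  unfold Spec_rotate_tag_py rotate_tag_py rotate_tag_py_alt
  rw [pvFoldl_ignore, PySem.List.length_pyRange_one]
  by_cases hn : n ≤ 0
  · have h0 : (n - 0).toNat = 0 := by omega
    rw [h0, if_pos hn]; rfl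
  · have hn' : 0 < n := by omega
    have hmod : PySem.Int.mod n 4 = n % 4 := PySem.Int.mod_eq_emod_of_pos (by norm_num)
    obtain ⟨m, hm⟩ : ∃ m, (n - 0).toNat = m + 1 := ⟨(n - 0).toNat - 1, by omega⟩
    rw [hm, pvLoopA_eq]
    simp only [if_neg hn]
    refine List.filterMap_congr (fun t _ => ?_)
    exact pvF_period (m + 1) (n % 4).toNat (by omega) t |>.trans (by rw [pvF, hmod])
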